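-- pv_equiv track=rewrite | github.com/Minhao-Zhang/MC-AI-Assistant | helpers.py | remove_unnecessary_sections
-- ===== SOURCE A (Python) =====
-- def remove_unnecessary_sections(text: str) -> str:
--     """
--     Remove some unnecessary sections from the text.
--     See source for the list of sections to remove.
--
--     Args:
--         text (str): markdown style text
--
--     Returns:
--         str: text without not unnecessary sections from the text
--     """
--
--     UNWANTED_HEADING_2 = ['Achievements', 'Advancements', 'Contents', 'Data values', 'Entities', 'External links',
--                           'Gallery', 'History', 'Issues', 'Navigation', 'Navigation menu', 'References', 'Sounds', 'Trivia', 'Video', '|', 'Videos', 'See also']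
--
--     text_line = text.split('\n')
--     new_text = []
--
--     to_remove = False  # Flag to remove the section
--     for line in text_line:
--         if line.startswith('## '):
--             heading = line[3:].strip()
--             if heading in UNWANTED_HEADING_2:
--                 to_remove = True
--             else:
--                 to_remove = False
--                 new_text.append(line)
--         else:
--             if not to_remove:
--                 new_text.append(line)
--
--     return '\n'.join(new_text)
-- ===== SOURCE B (Python) =====
-- def remove_unnecessary_sections(text: str) -> str:
--     """Two-phase rewrite: partition the lines into a preamble and '## '-headed
--     sections, then keep whole sections whose heading is wanted."""
--     UNWANTED_HEADING_2 = frozenset(['Achievements', 'Advancements', 'Contents', 'Data values', 'Entities',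
--                                     'External links', 'Gallery', 'History', 'Issues', 'Navigation',
--                                     'Navigation menu', 'References', 'Sounds', 'Trivia', 'Video', '|',
--                                     'Videos', 'See also'])
--     preamble = []
--     sections = []
--     for line in text.split('\n'):
--         if line.startswith('## '):
--             sections.append([line])
--         elif sections:
--             sections[-1].append(line)
--         else:
--             preamble.append(line)
--     kept = preamble
--     for sec in sections:
--         if sec[0][3:].strip() not in UNWANTED_HEADING_2:
--             kept = kept + sec
--     return '\n'.join(kept)
-- ===== Notes on version B (the rewrite author's own statement) =====
-- stated objective: alternative
-- what changed: Replaces A's single-pass boolean-flag state machine with a two-phase decomposition: first partition the lines into a preamble plus level-2-heading sections, then filter whole sections by their heading and rejoin.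
import Mathlib
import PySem

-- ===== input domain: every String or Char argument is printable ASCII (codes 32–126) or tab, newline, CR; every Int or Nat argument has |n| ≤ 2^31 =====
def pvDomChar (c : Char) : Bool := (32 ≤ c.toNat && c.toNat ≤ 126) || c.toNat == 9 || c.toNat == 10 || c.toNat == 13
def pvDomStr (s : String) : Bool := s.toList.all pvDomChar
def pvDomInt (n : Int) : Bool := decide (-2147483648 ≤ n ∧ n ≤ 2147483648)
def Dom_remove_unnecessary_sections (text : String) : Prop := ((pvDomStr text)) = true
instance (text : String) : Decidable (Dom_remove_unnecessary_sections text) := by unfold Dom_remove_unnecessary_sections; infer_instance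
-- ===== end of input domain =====

-- B replaces A's one-pass boolean-flag state machine by a two-phase decomposition
-- (partition into preamble + '## '-headed sections, then filter whole sections); equal output.

-- ===== PORT A =====
def UNWANTED_HEADING_2 : List String :=
  ["Achievements", "Advancements", "Contents", "Data values", "Entities", "External links",
   "Gallery", "History", "Issues", "Navigation", "Navigation menu", "References", "Sounds",
   "Trivia", "Video", "|", "Videos", "See also"]

-- the body of A's for-loop, state = (new_text, to_remove)
def pvStepA (st : List String × Bool) (line : String) : List String × Bool :=
  if PySem.Str.startswith line "## " then
    let heading := PySem.Str.strip (PySem.Str.slice line (some 3) none)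
    if heading ∈ UNWANTED_HEADING_2 then (st.1, true)
    else (st.1 ++ [line], false)
  else
    if st.2 then st else (st.1 ++ [line], st.2)

def remove_unnecessary_sections (text : String) : String :=
  let text_line := (PySem.Str.split? text "\n").getD [""]   -- sep "\n" ≠ "": split? is always `some`
  let res := text_line.foldl pvStepA ([], false)
  PySem.Str.join "\n" res.1

-- ===== PORT B =====
-- B's frozenset literal (its elements are distinct, so ofList keeps them all)
def pvUnwantedB : PySem.Set String :=
  PySem.Set.ofList
    ["Achievements", "Advancements", "Contents", "Data values", "Entities", "External links",
     "Gallery", "History", "Issues", "Navigation", "Navigation menu", "References", "Sounds",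
     "Trivia", "Video", "|", "Videos", "See also"]

-- phase-1 loop body, state = (preamble, sections); sections[-1].append(line) becomes dropLast ++ [last ++ [line]]
def pvStepB (st : List String × List (List String)) (line : String) : List String × List (List String) :=
  if PySem.Str.startswith line "## " then (st.1, st.2 ++ [[line]])
  else if st.2.isEmpty then (st.1 ++ [line], st.2)
  else (st.1, st.2.dropLast ++ [st.2.getLastD [] ++ [line]])

-- B's section test: sec[0][3:].strip() not in UNWANTED_HEADING_2
def pvKeepB (sec : List String) : Bool :=
  !(pvUnwantedB.contains (PySem.Str.strip (PySem.Str.slice (sec.headD "") (some 3) none)))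

def remove_unnecessary_sections_alt (text : String) : String :=
  let st := ((PySem.Str.split? text "\n").getD [""]).foldl pvStepB ([], [])
  let kept := st.2.foldl (fun acc sec => if pvKeepB sec then acc ++ sec else acc) st.1
  PySem.Str.join "\n" kept

-- ===== PRECONDITION & SPEC =====
def Spec_remove_unnecessary_sections (text : String) (out : String) : Prop := out = remove_unnecessary_sections_alt text
instance (text : String) (out : String) : Decidable (Spec_remove_unnecessary_sections text out) := by unfold Spec_remove_unnecessary_sections; infer_instance

-- ===== CLAIM (what is proved, stated in full; the proofs are below) =====
def Claim_equal_remove_unnecessary_sections : Prop := ∀ (text : String), Dom_remove_unnecessary_sections text → Spec_remove_unnecessary_sections text (remove_unnecessary_sections text)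

-- ===== LEMMAS AND PROOFS =====

-- A's loop, written as the recursion it performs (proof-only helper)
def pvAuxA (lines : List String) (rm : Bool) : List String :=
  match lines with
  | [] => []
  | l :: ls =>
    if PySem.Str.startswith l "## " then
      if PySem.Str.strip (PySem.Str.slice l (some 3) none) ∈ UNWANTED_HEADING_2 then pvAuxA ls true
      else l :: pvAuxA ls false
    else
      if rm then pvAuxA ls rm else l :: pvAuxA ls rm

-- the (preamble, sections) partition, as a right-recursion (proof-only helper)
def pvSecs (lines : List String) : List String × List (List String) :=
  match lines with
  | [] => ([], [])
  | l :: ls =>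
    let r := pvSecs ls
    if PySem.Str.startswith l "## " then ([], (l :: r.1) :: r.2)
    else (l :: r.1, r.2)

theorem mem_unwantedB (x : String) : x ∈ pvUnwantedB ↔ x ∈ UNWANTED_HEADING_2 := by
  have h : pvUnwantedB = PySem.Set.ofList UNWANTED_HEADING_2 := rfl
  rw [h]
  exact PySem.Set.mem_ofList ..

theorem foldlA_eq (lines : List String) : ∀ (acc : List String) (rm : Bool),
    (lines.foldl pvStepA (acc, rm)).1 = acc ++ pvAuxA lines rm := by
  induction lines with
  | nil => intro acc rm; simp [pvAuxA]
  | cons l ls ih =>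
    intro acc rm
    simp only [List.foldl_cons, pvStepA, pvAuxA]
    split_ifs with h1 h2 h3 <;> simp [ih]

theorem foldlB_snoc (lines : List String) : ∀ (pre : List String) (ss : List (List String)) (s : List String),
    lines.foldl pvStepB (pre, ss ++ [s]) = (pre, ss ++ [s ++ (pvSecs lines).1] ++ (pvSecs lines).2) := by
  induction lines with
  | nil => intro pre ss s; simp [pvSecs]
  | cons l ls ih =>
    intro pre ss s
    simp only [List.foldl_cons, pvStepB, pvSecs]
    by_cases h1 : PySem.Str.startswith l "## "
    · rw [if_pos h1, if_pos h1]
      rw [show ss ++ [s] ++ [[l]] = (ss ++ [s]) ++ [[l]] from rfl, ih pre (ss ++ [s]) [l]]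
      simp
    · rw [if_neg h1, if_neg h1]
      have he : (ss ++ [s]).isEmpty = false := by simp
      rw [he]
      simp only [Bool.false_eq_true, if_false]
      have hd : (ss ++ [s]).dropLast = ss := by simp
      have hg : (ss ++ [s]).getLastD [] = s := by simp
      rw [hd, hg, ih pre ss (s ++ [l])]
      simp

theorem foldlB_eq (lines : List String) : ∀ (pre : List String),
    lines.foldl pvStepB (pre, []) = (pre ++ (pvSecs lines).1, (pvSecs lines).2) := by
  induction lines with
  | nil => intro pre; simp [pvSecs]
  | cons l ls ih =>
    intro pre
    simp only [List.foldl_cons, pvStepB, pvSecs]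
    by_cases h1 : PySem.Str.startswith l "## "
    · rw [if_pos h1, if_pos h1,
        show ([] : List (List String)) ++ [[l]] = ([] : List (List String)) ++ [[l]] from rfl,
        foldlB_snoc ls pre [] [l]]
      simp
    · rw [if_neg h1, if_neg h1]
      simp only [List.isEmpty_nil, if_true]
      rw [ih (pre ++ [l])]
      simp

theorem auxA_eq_secs (lines : List String) :
    pvAuxA lines false = (pvSecs lines).1 ++ (((pvSecs lines).2.filter pvKeepB).flatten) ∧
    pvAuxA lines true = ((pvSecs lines).2.filter pvKeepB).flatten := by
  induction lines with
  | nil => simp [pvAuxA, pvSecs]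
  | cons l ls ih =>
    by_cases h1 : PySem.Str.startswith l "## "
    · have h1' : PySem.Chars.startswith l.toList ['#', '#', ' '] = true := by simpa using h1
      by_cases h2 : PySem.Str.strip (PySem.Str.slice l (some 3) none) ∈ UNWANTED_HEADING_2
      · have hk : pvKeepB (l :: (pvSecs ls).1) = false := by
          simp only [pvKeepB, List.headD_cons, Bool.not_eq_false']
          exact (PySem.Set.contains_iff _ _).mpr ((mem_unwantedB _).mpr h2)
        simp [pvAuxA, pvSecs, h1', h2, hk, ih.2]
      · have hk : pvKeepB (l :: (pvSecs ls).1) = true := by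
          simp only [pvKeepB, List.headD_cons, Bool.not_eq_true']
          exact Bool.eq_false_iff.mpr
            (fun hc => h2 ((mem_unwantedB _).mp ((PySem.Set.contains_iff _ _).mp hc)))
        simp [pvAuxA, pvSecs, h1', h2, hk, ih.1]
    · have h1' : PySem.Chars.startswith l.toList ['#', '#', ' '] = false := by
        simpa using h1
      simp [pvAuxA, pvSecs, h1', ih.1, ih.2]

theorem kept_eq (ss : List (List String)) : ∀ (pre : List String),
    ss.foldl (fun acc sec => if pvKeepB sec then acc ++ sec else acc) pre
      = pre ++ (ss.filter pvKeepB).flatten := by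
  induction ss with
  | nil => simp
  | cons s t ih =>
    intro pre
    simp only [List.foldl_cons, List.filter_cons]
    by_cases h : pvKeepB s <;> simp [h, ih]

-- ===== VERDICT (by name: the statement is the Claim_ definition above) =====
theorem remove_unnecessary_sections_spec : Claim_equal_remove_unnecessary_sections := by
  intro text _
  unfold Spec_remove_unnecessary_sections remove_unnecessary_sections remove_unnecessary_sections_alt
  dsimp only
  rw [foldlA_eq, foldlB_eq, kept_eq, (auxA_eq_secs _).1]
  simp
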